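-- pv_equiv track=rewrite | github.com/DarkWinD1437/criptoBraulio | CifSustMonoPoli/ataque_kasiski.py | calcular_posibles_longitudes
-- ===== SOURCE A (Python) =====
-- from collections import defaultdict, Counter
--
-- def calcular_posibles_longitudes(distancias, max_longitud=20):
--     """Calcula posibles longitudes de clave basado en factores comunes"""
--     factores = Counter()
--
--     for distancia in distancias:
--         # Considerar todos los factores posibles
--         for i in range(2, min(distancia, max_longitud) + 1):
--             if distancia % i == 0:
--                 factores[i] += 1
--
--     # Ordenar factores por frecuencia y magnitud
--     factores_ordenados = sorted(factores.items(), key=lambda x: (-x[1], x[0]))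
--
--     # Devolver solo las longitudes más probables
--     return [f[0] for f in factores_ordenados[:3]] if factores_ordenados else [3, 4, 5]  # Valores por defecto
-- ===== SOURCE B (Python) =====
-- def calcular_posibles_longitudes(distancias, max_longitud=20):
--     """Calcula posibles longitudes de clave basado en factores comunes"""
--     # Candidate-major pass: for each candidate length k (no candidate beyond the
--     # largest distance can divide anything), count in one sweep how many
--     # distances it divides; no Counter and no per-distance factor loop.
--     limite = min(max_longitud, max(distancias, default=1))
--     pares = [(k, sum(1 for d in distancias if d >= k and d % k == 0))
--              for k in range(2, limite + 1)]
--     pares = [(k, c) for (k, c) in pares if c > 0]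
--     if not pares:
--         return [3, 4, 5]
--     pares.sort(key=lambda p: (-p[1], p[0]))
--     return [k for (k, c) in pares[:3]]
-- ===== Notes on version B (the rewrite author's own statement) =====
-- stated objective: alternative
-- what changed: Replaces the distance-major nested loop that increments a Counter and then sorts its items with a candidate-major pass: for each candidate length k up to min(max_longitud, max(distancias)) it counts divisible distances in one sweep, so no Counter/dict is built at all.
import Mathlib
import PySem

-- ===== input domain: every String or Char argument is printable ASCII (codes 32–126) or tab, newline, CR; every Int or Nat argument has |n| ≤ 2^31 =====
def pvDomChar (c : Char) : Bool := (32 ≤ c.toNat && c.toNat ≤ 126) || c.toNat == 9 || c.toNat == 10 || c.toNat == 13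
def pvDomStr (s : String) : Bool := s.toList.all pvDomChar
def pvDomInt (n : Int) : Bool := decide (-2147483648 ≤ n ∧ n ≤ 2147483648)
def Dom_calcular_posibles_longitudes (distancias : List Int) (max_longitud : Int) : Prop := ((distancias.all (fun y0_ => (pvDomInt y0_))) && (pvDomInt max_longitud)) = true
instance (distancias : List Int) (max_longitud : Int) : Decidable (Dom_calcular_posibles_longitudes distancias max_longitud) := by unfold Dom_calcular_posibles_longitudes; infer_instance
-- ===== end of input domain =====

-- B replaces A's distance-major Counter loop by a candidate-major counting pass
-- (one sweep of the distances per candidate length, no Counter); same return value.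


-- ===== PORT A =====
def calcular_posibles_longitudes (distancias : List Int) (max_longitud : Int) : List Int :=
  let factores : PySem.Dict Int Int :=
    distancias.foldl (fun factores distancia =>
      (PySem.List.pyRange 2 (min distancia max_longitud + 1) 1).foldl
        (fun factores i =>
          if PySem.Int.mod distancia i == 0 then factores.modify i 0 (· + 1) else factores)
        factores)
      PySem.Dict.empty
  let factores_ordenados :=
    PySem.List.sorted2 factores.items (fun x => -x.2) (fun x => x.1)
  if factores_ordenados ≠ [] then (factores_ordenados.take 3).map (fun f => f.1)
  else [3, 4, 5]

-- ===== PORT B =====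
def calcular_posibles_longitudes_alt (distancias : List Int) (max_longitud : Int) : List Int :=
  let limite := min max_longitud (PySem.List.maxD distancias (fun x => x) 1)
  let pares :=
    (PySem.List.pyRange 2 (limite + 1) 1).map
      (fun k => (k, distancias.foldl
          (fun s d => s + (if decide (d ≥ k) && (PySem.Int.mod d k == 0) then 1 else 0)) (0 : Int)))
  let pares2 := pares.filter (fun p => decide (p.2 > 0))
  if pares2 = [] then [3, 4, 5]
  else ((PySem.List.sorted2 pares2 (fun p => -p.2) (fun p => p.1)).take 3).map (fun p => p.1)

-- ===== PRECONDITION & SPEC =====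
def Spec_calcular_posibles_longitudes (distancias : List Int) (max_longitud : Int) (out : List Int) : Prop := out = calcular_posibles_longitudes_alt distancias max_longitud
instance (distancias : List Int) (max_longitud : Int) (out : List Int) : Decidable (Spec_calcular_posibles_longitudes distancias max_longitud out) := by unfold Spec_calcular_posibles_longitudes; infer_instance

-- ===== CLAIM (what is proved, stated in full; the proofs are below) =====
def Claim_equal_calcular_posibles_longitudes : Prop := ∀ (distancias : List Int) (max_longitud : Int), Dom_calcular_posibles_longitudes distancias max_longitud → Spec_calcular_posibles_longitudes distancias max_longitud (calcular_posibles_longitudes distancias max_longitud)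

-- ===== LEMMAS AND PROOFS =====

-- the list of factors A counts for one distance, and their concatenation over all distances
def pvPiece (M d : Int) : List Int :=
  (PySem.List.pyRange 2 (min d M + 1) 1).filter (fun i => PySem.Int.mod d i == 0)
def pvFull (ds : List Int) (M : Int) : List Int := ds.flatMap (pvPiece M)
-- B's per-candidate count, as a countP
def pvCnt (ds : List Int) (k : Int) : Int :=
  (ds.countP (fun d => decide (d ≥ k) && (PySem.Int.mod d k == 0)) : Int)

lemma pv_foldl_flatMap {α β δ : Type} (g : α → List β) (step : δ → β → δ)
    (ds : List α) (init : δ) :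
    ds.foldl (fun acc d => (g d).foldl step acc) init = (ds.flatMap g).foldl step init := by
  induction ds generalizing init with
  | nil => rfl
  | cons d t ih => simp [List.flatMap_cons, List.foldl_append, ih]

-- A's nested counting loop builds Counter(pvFull ds M)
lemma pvA_counter (ds : List Int) (M : Int) :
    ds.foldl (fun factores distancia =>
      (PySem.List.pyRange 2 (min distancia M + 1) 1).foldl
        (fun factores i =>
          if PySem.Int.mod distancia i == 0 then factores.modify i 0 (· + 1) else factores)
        factores)
      PySem.Dict.empty = PySem.Dict.counter (pvFull ds M) := by
  rw [PySem.Dict.counter_eq_foldl, pvFull,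
    ← pv_foldl_flatMap (pvPiece M) (fun d x => PySem.Dict.modify d x 0 (fun v => v + 1)) ds PySem.Dict.empty]
  refine PySem.List.foldl_congr_mem _ _ _ _ (fun acc d _ => ?_)
  rw [pvPiece, PySem.List.foldl_if_eq_foldl_filter]

-- B's running sum is the countP
lemma pvB_cnt (ds : List Int) (k : Int) :
    ds.foldl (fun s d => s + (if decide (d ≥ k) && (PySem.Int.mod d k == 0) then 1 else 0)) (0 : Int)
      = pvCnt ds k := by
  rw [PySem.List.foldl_add, PySem.List.sum_map_ite_one_zero, pvCnt, zero_add]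

lemma pv_mem_piece (M d k : Int) :
    k ∈ pvPiece M d ↔ 2 ≤ k ∧ k ≤ min d M ∧ PySem.Int.mod d k = 0 := by
  simp [pvPiece, List.mem_filter, PySem.List.mem_pyRange_one]
  omega

lemma pv_count_piece (M d k : Int) :
    (pvPiece M d).count k
      = if 2 ≤ k ∧ k ≤ min d M ∧ PySem.Int.mod d k = 0 then 1 else 0 := by
  by_cases h : 2 ≤ k ∧ k ≤ min d M ∧ PySem.Int.mod d k = 0
  · rw [if_pos h]
    refine List.count_eq_one_of_mem ?_ ((pv_mem_piece M d k).mpr h)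
    exact (PySem.List.nodup_pyRange_one _ _).filter _
  · rw [if_neg h]
    exact List.count_eq_zero_of_not_mem (fun hmem => h ((pv_mem_piece M d k).mp hmem))

-- the multiplicity of k in A's counted list is B's count, for candidates 2 ≤ k ≤ M
lemma pv_count_full (ds : List Int) (M k : Int) (h2 : 2 ≤ k) (hM : k ≤ M) :
    ((pvFull ds M).count k : Int) = pvCnt ds k := by
  induction ds with
  | nil => rfl
  | cons d t ih =>
    rw [pvFull, List.flatMap_cons, List.count_append, pvCnt, List.countP_cons]
    rw [pvFull] at ih
    rw [pvCnt] at ih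
    push_cast
    rw [ih, pv_count_piece]
    by_cases hdk : k ≤ d ∧ PySem.Int.mod d k = 0
    · rw [if_pos ⟨h2, by omega, hdk.2⟩]
      have : (decide (d ≥ k) && (PySem.Int.mod d k == 0)) = true := by
        simp [hdk.1, hdk.2]
      rw [this]
      simp
      omega
    · have hb : (decide (d ≥ k) && (PySem.Int.mod d k == 0)) = false := by
        rcases Decidable.not_and_iff_or_not.mp hdk with h | h
        · simp [h]
        · simp [h]
      rw [if_neg (fun hc => hdk ⟨by omega, hc.2.2⟩), hb]
      simp

lemma pv_mem_full (ds : List Int) (M k : Int) :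
    k ∈ pvFull ds M ↔ ∃ d ∈ ds, 2 ≤ k ∧ k ≤ min d M ∧ PySem.Int.mod d k = 0 := by
  simp [pvFull, List.mem_flatMap, pv_mem_piece]

lemma pv_le_maxD (ds : List Int) (d : Int) (hd : d ∈ ds) :
    d ≤ PySem.List.maxD ds (fun x => x) 1 := by
  rcases hm : PySem.List.max? ds (fun x : Int => x) with _ | m
  · rw [PySem.List.max?_eq_none_iff] at hm
    simp [hm] at hd
  · have := PySem.List.max?_isMax hm d hd
    simp [PySem.List.maxD, hm]
    exact this

lemma pv_cnt_pos (ds : List Int) (k : Int) :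
    0 < pvCnt ds k ↔ ∃ d ∈ ds, k ≤ d ∧ PySem.Int.mod d k = 0 := by
  rw [pvCnt, Int.natCast_pos, List.countP_pos_iff]
  constructor
  · rintro ⟨d, hd, hp⟩
    simp at hp
    exact ⟨d, hd, hp.1, hp.2⟩
  · rintro ⟨d, hd, h1, h2⟩
    exact ⟨d, hd, by simp [h1, h2]⟩

-- the distinct counted factors are exactly B's surviving candidates (as a permutation)
lemma pv_keys_perm (ds : List Int) (M : Int) :
    (PySem.Set.ofList (pvFull ds M)).Perm
      ((PySem.List.pyRange 2 (min M (PySem.List.maxD ds (fun x => x) 1) + 1) 1).filter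
        (fun k => decide (0 < pvCnt ds k))) := by
  refine (List.perm_ext_iff_of_nodup (PySem.Set.nodup_ofList _)
    ((PySem.List.nodup_pyRange_one _ _).filter _)).mpr (fun k => ?_)
  rw [PySem.Set.mem_ofList, pv_mem_full, List.mem_filter, PySem.List.mem_pyRange_one,
    decide_eq_true_eq, pv_cnt_pos]
  constructor
  · rintro ⟨d, hd, h2, hmin, hm⟩
    have := pv_le_maxD ds d hd
    exact ⟨⟨h2, by omega⟩, d, hd, by omega, hm⟩
  · rintro ⟨⟨h2, hlt⟩, d, hd, hkd, hm⟩
    exact ⟨d, hd, h2, by omega, hm⟩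

lemma pv_sorted2_eq_sorted_lex {α : Type} (xs : List α) (k1 k2 : α → Int) :
    PySem.List.sorted2 xs k1 k2 = PySem.List.sorted xs (fun x => toLex (k1 x, k2 x)) := by
  show List.foldl _ [] xs = List.foldl _ [] xs
  have hb : (fun a b => decide (k1 a < k1 b) || !decide (k1 b < k1 a) && decide (k2 a < k2 b))
      = (fun a b : α => decide (toLex (k1 a, k2 a) < toLex (k1 b, k2 b))) := by
    funext a b
    rcases lt_trichotomy (k1 a) (k1 b) with h | h | h
    · simp [h, Prod.Lex.toLex_lt_toLex]
    · simp [h, Prod.Lex.toLex_lt_toLex]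
    · simp [h, Prod.Lex.toLex_lt_toLex, not_lt_of_gt h]
      omega
  rw [hb]

lemma pv_key_inj : Function.Injective (fun p : Int × Int => toLex (-p.2, p.1)) := by
  intro p q h
  have h' : ((-p.2, p.1) : Int × Int) = (-q.2, q.1) := by
    simpa using congrArg ofLex h
  rw [Prod.ext_iff] at h' ⊢
  simp only [neg_inj] at h'
  exact ⟨h'.2, h'.1⟩

-- A's Counter items are a permutation of B's filtered candidate/count pairs
lemma pv_items_perm (ds : List Int) (M : Int) :
    (PySem.Dict.counter (pvFull ds M)).items.Perm
      (((PySem.List.pyRange 2 (min M (PySem.List.maxD ds (fun x => x) 1) + 1) 1).map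
          (fun k => (k, pvCnt ds k))).filter (fun p => decide (p.2 > 0))) := by
  rw [PySem.Dict.items_counter, List.filter_map]
  have hmapA : (PySem.Set.ofList (pvFull ds M)).map
      (fun k => (k, ((pvFull ds M).count k : Int)))
      = (PySem.Set.ofList (pvFull ds M)).map (fun k => (k, pvCnt ds k)) := by
    refine List.map_congr_left (fun k hk => ?_)
    rw [PySem.Set.mem_ofList, pv_mem_full] at hk
    obtain ⟨d, _, h2, hmin, _⟩ := hk
    rw [pv_count_full ds M k h2 (by omega)]
  rw [hmapA]
  have hpf : ((fun p : Int × Int => decide (p.2 > 0)) ∘ (fun k => (k, pvCnt ds k)))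
      = fun k => decide (0 < pvCnt ds k) := rfl
  rw [hpf]
  exact (pv_keys_perm ds M).map _

-- ===== VERDICT (by name: the statement is the Claim_ definition above) =====
theorem calcular_posibles_longitudes_spec : Claim_equal_calcular_posibles_longitudes := by
  intro ds M _
  show calcular_posibles_longitudes ds M = calcular_posibles_longitudes_alt ds M
  rw [calcular_posibles_longitudes, calcular_posibles_longitudes_alt]
  simp only [pvA_counter, pvB_cnt]
  have hperm := pv_items_perm ds M
  have hsort :
      PySem.List.sorted2 (PySem.Dict.counter (pvFull ds M)).items
          (fun x => -x.2) (fun x => x.1)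
        = PySem.List.sorted2
            (((PySem.List.pyRange 2 (min M (PySem.List.maxD ds (fun x => x) 1) + 1) 1).map
                (fun k => (k, pvCnt ds k))).filter (fun p => decide (p.2 > 0)))
            (fun x => -x.2) (fun x => x.1) := by
    rw [pv_sorted2_eq_sorted_lex, pv_sorted2_eq_sorted_lex]
    exact PySem.List.sorted_eq_sorted_of_perm _ _ _ pv_key_inj hperm
  rw [hsort]
  set pares2 := ((PySem.List.pyRange 2 (min M (PySem.List.maxD ds (fun x => x) 1) + 1) 1).map
      (fun k => (k, pvCnt ds k))).filter (fun p => decide (p.2 > 0)) with hp2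
  have hnil : PySem.List.sorted2 pares2 (fun x : Int × Int => -x.2) (fun x => x.1) = []
      ↔ pares2 = [] := by
    rw [pv_sorted2_eq_sorted_lex]
    exact PySem.List.sorted_eq_nil_iff _ _ _
  by_cases h : pares2 = []
  · rw [if_neg (fun hc => hc (hnil.mpr h)), if_pos h]
  · rw [if_pos (fun hc => h (hnil.mp hc)), if_neg h]
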